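-- pv_equiv track=rewrite | github.com/Human-Cognome-Project/human-cognome-project | work/hcp/core/token_id.py | encode_base20
-- ===== SOURCE A (Python) =====
-- BASE20_CHARS = "0123456789ABCDEFGHIJ"
--
-- def encode_base20(value: int, min_length: int = 1) -> str:
--     """Encode an integer as a base-20 string."""
--     if value < 0:
--         raise ValueError("Cannot encode negative values")
--     if value == 0:
--         return BASE20_CHARS[0] * min_length
--
--     chars = []
--     while value:
--         chars.append(BASE20_CHARS[value % 20])
--         value //= 20
--
--     result = "".join(reversed(chars))
--     if len(result) < min_length:
--         result = BASE20_CHARS[0] * (min_length - len(result)) + result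
--     return result
-- ===== SOURCE B (Python) =====
-- BASE20_CHARS = "0123456789ABCDEFGHIJ"
--
-- def encode_base20(value: int, min_length: int = 1) -> str:
--     """Encode an integer as a base-20 string."""
--     if value < 0:
--         raise ValueError("Cannot encode negative values")
--     digits = []
--     if value > 0:
--         p = 1
--         while p * 20 <= value:
--             p *= 20
--         while p > 0:
--             digits.append(BASE20_CHARS[(value // p) % 20])
--             p //= 20
--     s = "".join(digits)
--     return BASE20_CHARS[0] * (min_length - len(s)) + s
-- ===== Notes on version B (the rewrite author's own statement) =====
-- stated objective: alternative
-- what changed: B emits digits most-significant-first by maintaining a descending power-of-20 divisor (plus one uniform left-pad formula), instead of A's accumulate-remainders-then-reverse loop with a separate zero branch and conditional padding.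
import Mathlib
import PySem

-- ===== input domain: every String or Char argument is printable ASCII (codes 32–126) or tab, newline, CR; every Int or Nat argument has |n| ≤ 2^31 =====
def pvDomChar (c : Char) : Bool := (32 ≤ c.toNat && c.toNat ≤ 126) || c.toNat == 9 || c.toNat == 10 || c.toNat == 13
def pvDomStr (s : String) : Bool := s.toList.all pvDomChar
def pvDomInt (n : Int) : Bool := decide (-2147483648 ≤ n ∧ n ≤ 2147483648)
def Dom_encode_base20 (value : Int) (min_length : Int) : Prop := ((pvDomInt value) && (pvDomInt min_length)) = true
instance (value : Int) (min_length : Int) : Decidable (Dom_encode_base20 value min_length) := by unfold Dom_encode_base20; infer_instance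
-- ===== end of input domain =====

-- B builds the base-20 digits most-significant-first with a descending power divisor and one
-- uniform left-pad formula, instead of A's remainder-accumulate-and-reverse loop; same cost.

-- ===== PORT A =====
def pvB20 : String := "0123456789ABCDEFGHIJ"

-- BASE20_CHARS[i]: every index used below is 'x % 20' with the Python mod, which lies in [0, 20),
-- so pyGet? never returns none; the '?' default is unreachable.
def pvChar (i : Int) : Char := (PySem.Str.pyGet? pvB20 i).getD '?'

-- 'while value: chars.append(BASE20_CHARS[value % 20]); value //= 20'
-- On the path that reaches this loop value > 0 and stays ≥ 0, so 'value ≠ 0' is '0 < value'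
-- (the dite guard also gives termination).
def pvALoop (value : Int) (chars : List Char) : List Char :=
  if h : 0 < value then
    pvALoop (PySem.Int.floordiv value 20) (chars ++ [pvChar (PySem.Int.mod value 20)])
  else chars
termination_by value.toNat
decreasing_by
  rw [PySem.Int.floordiv_eq_ediv_of_pos (by norm_num)]; omega

def encode_base20 (value : Int) (min_length : Int) : String :=
  if value < 0 then ""        -- Python raises ValueError here; excluded by Pre_encode_base20
  else if value = 0 then
    -- BASE20_CHARS[0] * min_length (Python's str * n is "" for n ≤ 0)
    String.ofList (List.replicate min_length.toNat (pvChar 0))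
  else
    let result := (pvALoop value []).reverse      -- "".join(reversed(chars))
    if (result.length : Int) < min_length then
      String.ofList (List.replicate (min_length - result.length).toNat (pvChar 0) ++ result)
    else String.ofList result

-- ===== PORT B =====
-- 'while p * 20 <= value: p *= 20'; p starts at 1 and only grows, so 0 < p is a loop
-- invariant, added to the guard only for termination.
def pvPow (value : Int) (p : Int) : Int :=
  if h : 0 < p ∧ p * 20 ≤ value then pvPow value (p * 20) else p
termination_by (value - p).toNat
decreasing_by omega

-- 'while p > 0: digits.append(BASE20_CHARS[(value // p) % 20]); p //= 20'
def pvBLoop (value : Int) (p : Int) : List Char :=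
  if h : 0 < p then
    pvChar (PySem.Int.mod (PySem.Int.floordiv value p) 20) :: pvBLoop value (PySem.Int.floordiv p 20)
  else []
termination_by p.toNat
decreasing_by
  rw [PySem.Int.floordiv_eq_ediv_of_pos (by norm_num)]; omega

def encode_base20_alt (value : Int) (min_length : Int) : String :=
  if value < 0 then ""        -- Python raises ValueError here; excluded by Pre_encode_base20
  else
    let digits := if 0 < value then pvBLoop value (pvPow value 1) else []
    -- BASE20_CHARS[0] * (min_length - len(s)) + s  (str * n is "" for n ≤ 0)
    String.ofList (List.replicate (min_length - digits.length).toNat (pvChar 0) ++ digits)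

-- ===== PRECONDITION & SPEC =====
-- A raises ValueError exactly when value < 0.
def Pre_encode_base20 (value : Int) (min_length : Int) : Prop := 0 ≤ value
instance (value : Int) (min_length : Int) : Decidable (Pre_encode_base20 value min_length) := by
  unfold Pre_encode_base20; infer_instance

def pvWitness_encode_base20 : Int × Int := (421, 4)

def Spec_encode_base20 (value : Int) (min_length : Int) (out : String) : Prop := out = encode_base20_alt value min_length
instance (value : Int) (min_length : Int) (out : String) : Decidable (Spec_encode_base20 value min_length out) := by unfold Spec_encode_base20; infer_instance

-- ===== CLAIM (what is proved, stated in full; the proofs are below) =====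
def Claim_equal_encode_base20 : Prop := ∀ (value : Int) (min_length : Int), Dom_encode_base20 value min_length → Pre_encode_base20 value min_length → Spec_encode_base20 value min_length (encode_base20 value min_length)

-- ===== LEMMAS AND PROOFS =====

lemma pvFd20 (a : Int) : PySem.Int.floordiv a 20 = a / 20 :=
  PySem.Int.floordiv_eq_ediv_of_pos (by norm_num)

lemma pvFdP (a p : Int) (hp : 0 < p) : PySem.Int.floordiv a p = a / p :=
  PySem.Int.floordiv_eq_ediv_of_pos hp

lemma pvALoop_nil (v : Int) (cs : List Char) (hv : ¬ 0 < v) : pvALoop v cs = cs := by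
  rw [pvALoop]; simp [hv]

lemma pvBLoop_zero (v : Int) : pvBLoop v 0 = [] := by
  rw [pvBLoop]; norm_num

lemma pvBLoop_step (v p : Int) (hp : 0 < p) :
    pvBLoop v p = pvChar (PySem.Int.mod (PySem.Int.floordiv v p) 20) ::
      pvBLoop v (PySem.Int.floordiv p 20) := by
  rw [pvBLoop, dif_pos hp]

lemma pvBLoop_one (v : Int) : pvBLoop v 1 = [pvChar (PySem.Int.mod v 20)] := by
  rw [pvBLoop_step v 1 one_pos, pvFdP v 1 one_pos, Int.ediv_one,
    show PySem.Int.floordiv (1:Int) 20 = 0 by rw [pvFd20]; norm_num, pvBLoop_zero]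

-- A's loop with accumulator: the accumulator is only ever appended to.
lemma pvALoop_append_aux (n : Nat) : ∀ (v : Int) (cs : List Char), v.toNat ≤ n →
    pvALoop v cs = cs ++ pvALoop v [] := by
  induction n with
  | zero =>
    intro v cs h
    have hv : ¬ 0 < v := by omega
    rw [pvALoop_nil _ _ hv, pvALoop_nil _ _ hv]; simp
  | succ n ih =>
    intro v cs h
    by_cases hv : 0 < v
    · have hle : (PySem.Int.floordiv v 20).toNat ≤ n := by rw [pvFd20]; omega
      conv_lhs => rw [pvALoop]
      conv_rhs => rw [pvALoop]
      rw [dif_pos hv, dif_pos hv,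
        ih _ (cs ++ [pvChar (PySem.Int.mod v 20)]) hle,
        ih _ ([] ++ [pvChar (PySem.Int.mod v 20)]) hle]
      simp
    · rw [pvALoop_nil _ _ hv, pvALoop_nil _ _ hv]; simp

lemma pvALoop_append (v : Int) (cs : List Char) : pvALoop v cs = cs ++ pvALoop v [] :=
  pvALoop_append_aux v.toNat v cs le_rfl

lemma pvALoop_pos (v : Int) (hv : 0 < v) :
    pvALoop v [] = pvChar (PySem.Int.mod v 20) :: pvALoop (PySem.Int.floordiv v 20) [] := by
  conv_lhs => rw [pvALoop]
  rw [dif_pos hv, pvALoop_append]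
  simp

-- Peeling the LAST digit off B's MSB-first loop when the divisor is a power of 20.
lemma pvBLoop_pow_succ (v : Int) (hv : 0 ≤ v) : ∀ (k : Nat),
    pvBLoop v ((20 : Int) ^ (k + 1)) =
      pvBLoop (v / 20) ((20 : Int) ^ k) ++ [pvChar (PySem.Int.mod v 20)] := by
  intro k
  induction k generalizing v with
  | zero =>
    rw [pow_one, pow_zero,
      pvBLoop_step v 20 (by norm_num),
      show PySem.Int.floordiv (20:Int) 20 = 1 by rw [pvFd20]; norm_num,
      pvBLoop_one, pvBLoop_one, pvFd20]
    rfl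
  | succ k ih =>
    have hp : (0 : Int) < 20 ^ (k + 1 + 1) := by positivity
    rw [pvBLoop_step v _ hp]
    have hdd : PySem.Int.floordiv v ((20:Int) ^ (k + 1 + 1)) =
        PySem.Int.floordiv (v / 20) ((20:Int) ^ (k + 1)) := by
      rw [pvFdP _ _ hp, pvFdP _ _ (by positivity)]
      rw [show ((20:Int) ^ (k + 1 + 1)) = 20 * 20 ^ (k + 1) by ring]
      rw [← Int.ediv_ediv_of_nonneg (show (0:Int) ≤ 20 by norm_num)]
    have hpd : PySem.Int.floordiv ((20:Int) ^ (k + 1 + 1)) 20 = (20:Int) ^ (k + 1) := by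
      rw [pvFd20, show ((20:Int) ^ (k + 1 + 1)) = 20 ^ (k+1) * 20 by ring]
      exact Int.mul_ediv_cancel _ (by norm_num)
    rw [hdd, hpd, ih v hv,
      pvBLoop_step (v / 20) _ (show (0:Int) < 20 ^ (k+1) by positivity),
      show PySem.Int.floordiv ((20:Int) ^ (k + 1)) 20 = (20:Int) ^ k by
        rw [pvFd20, show ((20:Int) ^ (k + 1)) = 20 ^ k * 20 by ring]
        exact Int.mul_ediv_cancel _ (by norm_num)]
    simp

-- If 20^k is the highest power of 20 not exceeding v, B's digit list is the reverse of A's.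
lemma pvBLoop_eq_rev (k : Nat) : ∀ (v : Int), 0 < v → (20:Int) ^ k ≤ v → v < (20:Int) ^ (k + 1) →
    pvBLoop v ((20:Int) ^ k) = (pvALoop v []).reverse := by
  induction k with
  | zero =>
    intro v hv hlo hhi
    norm_num at hhi
    rw [pow_zero, pvBLoop_one, pvALoop_pos v hv,
      show PySem.Int.floordiv v 20 = 0 by rw [pvFd20]; omega,
      pvALoop_nil 0 [] (by norm_num)]
    simp
  | succ k ih =>
    intro v hv hlo hhi
    rw [pvBLoop_pow_succ v (by omega) k]
    have h20 : (0:Int) < 20 ^ k := by positivity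
    have hlo' : (20:Int) ^ k ≤ v / 20 := by
      rw [Int.le_ediv_iff_mul_le (by norm_num)]
      calc (20:Int) ^ k * 20 = 20 ^ (k+1) := by ring
        _ ≤ v := hlo
    have hhi' : v / 20 < (20:Int) ^ (k + 1) := by
      rw [Int.ediv_lt_iff_lt_mul (by norm_num)]
      calc v < 20 ^ (k + 1 + 1) := hhi
        _ = (20:Int) ^ (k+1) * 20 := by ring
    have hv' : 0 < v / 20 := lt_of_lt_of_le h20 hlo'
    rw [ih (v / 20) hv' hlo' hhi', pvALoop_pos v hv, pvFd20]
    simp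

-- pvPow v 1 returns a power of 20, and the largest one ≤ v.
lemma pvPow_spec_aux (n : Nat) : ∀ (j : Nat) (v : Int), (v - (20:Int) ^ j).toNat ≤ n →
    (20:Int) ^ j ≤ v →
    ∃ k : Nat, pvPow v ((20:Int) ^ j) = (20:Int) ^ k ∧ (20:Int) ^ k ≤ v ∧ v < (20:Int) ^ (k + 1) := by
  induction n with
  | zero =>
    intro j v hn hle
    rw [pvPow]
    have hj : (0:Int) < 20 ^ j := by positivity
    have hno : ¬ ((0:Int) < 20 ^ j ∧ (20:Int) ^ j * 20 ≤ v) := by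
      rintro ⟨-, h⟩
      have : (20:Int) ^ j * 20 ≤ 20 ^ j := by omega
      nlinarith
    rw [dif_neg hno]
    refine ⟨j, rfl, hle, ?_⟩
    by_contra hlt
    exact hno ⟨hj, by push_neg at hlt; calc (20:Int) ^ j * 20 = 20 ^ (j+1) := by ring
      _ ≤ v := hlt⟩
  | succ n ih =>
    intro j v hn hle
    rw [pvPow]
    have hj : (0:Int) < 20 ^ j := by positivity
    by_cases hc : (20:Int) ^ j * 20 ≤ v
    · rw [dif_pos ⟨hj, hc⟩]
      have hpow : (20:Int) ^ j * 20 = 20 ^ (j + 1) := by ring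
      rw [hpow]
      apply ih (j + 1) v _ (hpow ▸ hc)
      have : (20:Int) ^ j < 20 ^ (j + 1) := by
        rw [← hpow]; nlinarith
      omega
    · rw [dif_neg (by rintro ⟨-, h⟩; exact hc h)]
      refine ⟨j, rfl, hle, ?_⟩
      push_neg at hc
      calc v < (20:Int) ^ j * 20 := hc
        _ = 20 ^ (j + 1) := by ring

lemma pvPow_spec (v : Int) (hv : 1 ≤ v) :
    ∃ k : Nat, pvPow v 1 = (20:Int) ^ k ∧ (20:Int) ^ k ≤ v ∧ v < (20:Int) ^ (k + 1) := by
  have := pvPow_spec_aux (v - 1).toNat 0 v (by norm_num) (by simpa using hv)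
  simpa using this

lemma pvDigits_eq (v : Int) (hv : 0 < v) : pvBLoop v (pvPow v 1) = (pvALoop v []).reverse := by
  obtain ⟨k, hpw, hlo, hhi⟩ := pvPow_spec v hv
  rw [hpw]
  exact pvBLoop_eq_rev k v hv hlo hhi

-- ===== VERDICT (by name: the statement is the Claim_ definition above) =====
theorem encode_base20_spec : Claim_equal_encode_base20 := by
  intro value min_length _ hpre
  unfold Spec_encode_base20 encode_base20 encode_base20_alt
  have hnn : ¬ value < 0 := not_lt.mpr hpre
  rw [if_neg hnn, if_neg hnn]
  by_cases h0 : value = 0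
  · subst h0
    norm_num
  · have hv : 0 < value := lt_of_le_of_ne hpre (Ne.symm h0)
    rw [if_neg h0, if_pos hv, pvDigits_eq value hv]
    set R := (pvALoop value []).reverse with hR
    by_cases hlen : (R.length : Int) < min_length
    · rw [if_pos hlen]
    · rw [if_neg hlen]
      have hz : (min_length - (R.length : Int)).toNat = 0 := by omega
      show String.ofList R =
        String.ofList (List.replicate (min_length - (R.length : Int)).toNat (pvChar 0) ++ R)
      rw [hz]
      simp
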